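-- pv_equiv track=rewrite | github.com/ray-lius/LeetCode-Python | basic/admission.py | max_admissions
-- ===== SOURCE A (Python) =====
-- def max_admissions(N, M, applied, no_of_seats):
--     # Create a list of tuples where each tuple contains the number of seats and the index of the college
--     colleges = sorted([(seats, i) for i, seats in enumerate(no_of_seats)], reverse=True)
--
--     # Initialize the count of admissions to 0
--     admissions = 0
--
--     # Iterate over the colleges in descending order of the number of seats
--     for seats, college in colleges:
--         # Iterate over the students
--         for student in range(N):
--             # If the student has applied to the college and there are seats available, increment the count of admissions
--             if applied[student][college] == 1 and seats > 0:
--                 admissions += 1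
--                 # Decrement the number of seats in the college
--                 seats -= 1
--                 # Break the loop as the student can take admission in only one college
--                 break
--
--     return admissions
-- ===== SOURCE B (Python) =====
-- def max_admissions(N, M, applied, no_of_seats):
--     # A college admits exactly one student iff it has a seat and at least one applicant,
--     # so the answer is a direct count -- no sort, no seat-decrement, no break needed.
--     return sum(
--         1
--         for c in range(len(no_of_seats))
--         if no_of_seats[c] > 0 and any(applied[s][c] == 1 for s in range(N))
--     )
-- ===== Notes on version B (the rewrite author's own statement) =====
-- stated objective: simpler
-- what changed: Replaced the sort over (seats, index) pairs and the break-terminated per-college student loop with a single direct count: a college is counted iff it has a seat and any student applied, since A admits at most one student per college.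
import Mathlib
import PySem

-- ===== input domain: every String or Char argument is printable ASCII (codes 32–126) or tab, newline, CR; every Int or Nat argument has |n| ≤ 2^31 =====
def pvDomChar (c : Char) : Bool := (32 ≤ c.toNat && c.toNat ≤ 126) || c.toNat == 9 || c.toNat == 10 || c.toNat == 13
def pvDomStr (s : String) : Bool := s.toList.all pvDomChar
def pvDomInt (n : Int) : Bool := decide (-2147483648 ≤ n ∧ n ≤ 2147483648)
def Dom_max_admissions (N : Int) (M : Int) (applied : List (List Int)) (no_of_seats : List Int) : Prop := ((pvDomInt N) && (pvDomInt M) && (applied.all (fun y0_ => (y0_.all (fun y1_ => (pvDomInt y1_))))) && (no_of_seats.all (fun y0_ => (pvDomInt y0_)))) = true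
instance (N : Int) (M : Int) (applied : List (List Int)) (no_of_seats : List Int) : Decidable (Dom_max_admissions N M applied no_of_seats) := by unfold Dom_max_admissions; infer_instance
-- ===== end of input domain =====

-- B replaces A's descending sort and break-terminated per-college admission loop by a
-- direct count of colleges with a seat and at least one applicant (objective: simpler).

-- ===== PORT A =====
-- inner 'for student in range(N): … break' loop of A, one college at a time
def pvInnerA (applied : List (List Int)) (college : Int) (students : List Int)
    (seats admissions : Int) : Int :=
  match students with
  | [] => admissions
  | s :: rest =>
    if PySem.List.pyGetD (PySem.List.pyGetD applied s []) college 0 = 1 ∧ seats > 0 then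
      admissions + 1          -- 'admissions += 1; seats -= 1; break'
    else
      pvInnerA applied college rest seats admissions

def max_admissions (N : Int) (M : Int) (applied : List (List Int)) (no_of_seats : List Int) : Int :=
  let colleges := PySem.List.sorted2 ((PySem.List.enumerate no_of_seats).map (fun p => (p.2, p.1)))
      (fun p => p.1) (fun p => p.2) true
  colleges.foldl (fun admissions p =>
    pvInnerA applied p.2 (PySem.List.pyRange 0 N 1) p.1 admissions) 0

-- ===== PORT B =====
def max_admissions_alt (N : Int) (M : Int) (applied : List (List Int)) (no_of_seats : List Int) : Int :=
  ((PySem.List.pyRange 0 (PySem.List.len no_of_seats) 1).filter (fun c =>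
      decide (PySem.List.pyGetD no_of_seats c 0 > 0) &&
      (PySem.List.pyRange 0 N 1).any (fun s =>
        PySem.List.pyGetD (PySem.List.pyGetD applied s []) c 0 == 1))).length

-- ===== PRECONDITION & SPEC =====
-- Pre_ excludes exactly the inputs on which Python A raises IndexError: for every college c,
-- if student s < N is the FIRST whose row is missing or too short for c, A's inner loop must
-- already have broken before s, i.e. the college has a seat and an earlier student applied to it.
-- (The first such s, if any, is at most applied.length, hence the min-bound on s.)
def Pre_max_admissions (N : Int) (M : Int) (applied : List (List Int)) (no_of_seats : List Int) : Prop :=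
  ∀ c < no_of_seats.length,
    ∀ s < min N.toNat (applied.length + 1),
      (applied.length ≤ s ∨ (applied.getD s []).length ≤ c) →
      (∀ s' < s, s' < applied.length ∧ c < (applied.getD s' []).length) →
      (0 < no_of_seats.getD c 0 ∧ ∃ s' < s, (applied.getD s' []).getD c 0 = 1)

instance (N : Int) (M : Int) (applied : List (List Int)) (no_of_seats : List Int) : Decidable (Pre_max_admissions N M applied no_of_seats) := by unfold Pre_max_admissions; exact Nat.decidableBallLT _ _

def pvWitness_max_admissions : Int × Int × List (List Int) × List Int :=
  (2, 2, [[1, 0], [0, 1]], [1, 0])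

def Spec_max_admissions (N : Int) (M : Int) (applied : List (List Int)) (no_of_seats : List Int) (out : Int) : Prop := out = max_admissions_alt N M applied no_of_seats
instance (N : Int) (M : Int) (applied : List (List Int)) (no_of_seats : List Int) (out : Int) : Decidable (Spec_max_admissions N M applied no_of_seats out) := by unfold Spec_max_admissions; infer_instance

-- ===== CLAIM (what is proved, stated in full; the proofs are below) =====
def Claim_equal_max_admissions : Prop := ∀ (N : Int) (M : Int) (applied : List (List Int)) (no_of_seats : List Int), Dom_max_admissions N M applied no_of_seats → Pre_max_admissions N M applied no_of_seats → Spec_max_admissions N M applied no_of_seats (max_admissions N M applied no_of_seats)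

-- ===== LEMMAS AND PROOFS =====

-- A's inner loop adds 1 exactly when the college still has a seat and some student applied.
theorem pvInnerA_eq (applied : List (List Int)) (college : Int) (students : List Int)
    (seats admissions : Int) :
    pvInnerA applied college students seats admissions =
      admissions + (if seats > 0 ∧ students.any
          (fun s => PySem.List.pyGetD (PySem.List.pyGetD applied s []) college 0 == 1)
        then 1 else 0) := by
  induction students with
  | nil => simp [pvInnerA]
  | cons s rest ih =>
    simp only [pvInnerA, List.any_cons]
    by_cases h : PySem.List.pyGetD (PySem.List.pyGetD applied s []) college 0 = 1
    · by_cases hs : seats > 0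
      · simp [h, hs]
      · simp [h, hs, ih]
    · simp [h, ih]

theorem max_admissions_spec : Claim_equal_max_admissions := by
  intro N M applied no_of_seats _ _
  unfold Spec_max_admissions max_admissions max_admissions_alt
  -- turn A's fold into a sum of indicators
  rw [show (fun admissions (p : Int × Int) =>
        pvInnerA applied p.2 (PySem.List.pyRange 0 N 1) p.1 admissions) =
      (fun admissions p => admissions +
        (if p.1 > 0 ∧ (PySem.List.pyRange 0 N 1).any
            (fun s => PySem.List.pyGetD (PySem.List.pyGetD applied s []) p.2 0 == 1)
          then (1 : Int) else 0)) from
    funext fun a => funext fun p => pvInnerA_eq applied p.2 _ p.1 a]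
  rw [PySem.List.foldl_add]
  -- the sorted list is a permutation of the enumerated pairs, and a sum ignores order
  have hperm := PySem.List.sorted2_perm
    ((PySem.List.enumerate no_of_seats).map (fun p => (p.2, p.1)))
    (fun p => p.1) (fun p => p.2) true
  rw [List.Perm.sum_eq (List.Perm.map _ hperm), zero_add,
    PySem.List.enumerate_eq_map_pyRange (d := 0), List.map_map, List.map_map]
  -- both sides now traverse the same index range: compare pointwise
  induction PySem.List.pyRange 0 (PySem.List.len no_of_seats) 1 with
  | nil => simp
  | cons c cs ih =>
    simp only [List.map_cons, List.sum_cons, List.filter_cons, Function.comp_apply, ih]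
    by_cases h1 : PySem.List.pyGetD no_of_seats c 0 > 0
    · by_cases h2 : (PySem.List.pyRange 0 N 1).any
          (fun s => PySem.List.pyGetD (PySem.List.pyGetD applied s []) c 0 == 1)
      · simp [h1, h2]
        ring
      · simp [h1, h2]
    · simp [h1]
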